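-- pv_equiv track=rewrite | github.com/AgustinGalarza6/Programacion_1 | Programacion_1/Funciones_(2da parte).py | verificar_DNI
-- ===== SOURCE A (Python) =====
-- def verificar_DNI(cadena: str) -> bool:
--     contador_DNI = 0
--     for num in cadena:
--         contador_DNI += 1
--
--     if (contador_DNI >= 6) and (contador_DNI <= 8):
--         return True
--     else:
--         return False
-- ===== SOURCE B (Python) =====
-- def verificar_DNI(cadena: str) -> bool:
--     return 6 <= len(cadena) <= 8
-- ===== Notes on version B (the rewrite author's own statement) =====
-- stated objective: idiomatic
-- what changed: Replaced the character-by-character counting loop with a closed-form chained range test on len(cadena).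
import Mathlib
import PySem

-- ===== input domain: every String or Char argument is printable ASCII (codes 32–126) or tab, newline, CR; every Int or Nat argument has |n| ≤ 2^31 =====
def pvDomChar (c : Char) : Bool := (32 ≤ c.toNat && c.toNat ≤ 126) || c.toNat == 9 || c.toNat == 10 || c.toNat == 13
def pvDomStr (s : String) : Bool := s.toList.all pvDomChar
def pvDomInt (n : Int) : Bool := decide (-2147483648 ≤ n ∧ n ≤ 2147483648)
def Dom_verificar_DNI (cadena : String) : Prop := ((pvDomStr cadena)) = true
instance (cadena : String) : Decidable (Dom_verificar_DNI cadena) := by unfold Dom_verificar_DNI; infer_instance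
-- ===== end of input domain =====

-- B replaces A's manual counting loop by the closed-form chained range test on the length (idiomatic).

-- ===== PORT A =====
-- literal port: fold over the characters incrementing an Int counter, then branch
def verificar_DNI (cadena : String) : Bool :=
  let contador_DNI : Int := cadena.toList.foldl (fun acc _ => acc + 1) 0
  if contador_DNI ≥ 6 ∧ contador_DNI ≤ 8 then true else false

-- ===== PORT B =====
def verificar_DNI_alt (cadena : String) : Bool :=
  6 ≤ (PySem.Str.len cadena) ∧ (PySem.Str.len cadena) ≤ 8

-- ===== PRECONDITION & SPEC =====
def Spec_verificar_DNI (cadena : String) (out : Bool) : Prop := out = verificar_DNI_alt cadena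
instance (cadena : String) (out : Bool) : Decidable (Spec_verificar_DNI cadena out) := by unfold Spec_verificar_DNI; infer_instance

-- ===== CLAIM (what is proved, stated in full; the proofs are below) =====
def Claim_equal_verificar_DNI : Prop := ∀ (cadena : String), Dom_verificar_DNI cadena → Spec_verificar_DNI cadena (verificar_DNI cadena)

-- ===== LEMMAS AND PROOFS =====
theorem pv_count_eq_len (l : List Char) : l.foldl (fun acc _ => acc + 1) (0 : Int) = (l.length : Int) := by
  have h : ∀ (init : Int), l.foldl (fun acc _ => acc + 1) init = init + l.length := by
    induction l with
    | nil => intro init; simp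
    | cons c t ih => intro init; simp [List.foldl, ih]; omega
  simpa using h 0

-- ===== VERDICT (by name: the statement is the Claim_ definition above) =====
theorem verificar_DNI_spec : Claim_equal_verificar_DNI := by
  intro cadena _
  unfold Spec_verificar_DNI verificar_DNI verificar_DNI_alt
  simp [pv_count_eq_len, PySem.Str.len]
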